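-- pv_equiv track=rewrite | github.com/maaargoooo/Omad_funktsioonid_larionovalogitpv21 | module1.py | xor_uncipher
-- ===== SOURCE A (Python) =====
-- def xor_uncipher(string:str, key: str)->str:
--     """Kodeeritud text dekodeeritakse
--     """
--     result = ""
--     temp = []
--     for i in range(len(string)):
--         temp.append(string[i])
--         for j in reversed(range(len(key))):
--             temp[i] = chr(ord(key[j]) ^ ord(temp[i]))
--         result += temp[i]
--     return result
-- ===== SOURCE B (Python) =====
-- def xor_uncipher(string: str, key: str) -> str:
--     """Kodeeritud text dekodeeritakse"""
--     k = 0
--     for ch in key: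
--         k ^= ord(ch)
--     return "".join(chr(ord(c) ^ k) for c in string)
-- ===== Notes on version B (the rewrite author's own statement) =====
-- stated objective: faster
-- what changed: Instead of XOR-ing every key character into every message character (nested loops over a temp list), B folds the key once into a single combined XOR value and applies it in one pass over the message.
import Mathlib
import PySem

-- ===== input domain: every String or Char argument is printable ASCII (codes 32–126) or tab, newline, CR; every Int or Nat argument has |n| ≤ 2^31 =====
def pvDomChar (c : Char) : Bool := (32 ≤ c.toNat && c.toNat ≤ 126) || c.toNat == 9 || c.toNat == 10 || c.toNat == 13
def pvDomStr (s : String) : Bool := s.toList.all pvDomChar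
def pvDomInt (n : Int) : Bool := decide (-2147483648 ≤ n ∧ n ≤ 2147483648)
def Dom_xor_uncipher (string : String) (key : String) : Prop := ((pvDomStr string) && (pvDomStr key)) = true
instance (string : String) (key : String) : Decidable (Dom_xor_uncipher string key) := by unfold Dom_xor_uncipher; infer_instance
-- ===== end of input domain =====

-- B replaces A's nested per-character loop over the key by one XOR-fold of the key applied once per
-- message character (objective: faster).
-- Char.ofNat is exact for Python's chr here: on Dom all codes involved stay below 128.

-- ===== PORT A =====
-- literal transliteration of A: result string, temp list, for i in range(len(string)):
-- temp.append(string[i]); for j in reversed(range(len(key))): temp[i] = chr(ord(key[j]) ^ ord(temp[i])); result += temp[i]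
def xor_uncipher (string : String) (key : String) : String :=
  let cs := string.toList
  let ks := key.toList
  let st := (List.range cs.length).foldl (fun (acc : List Char × List Char) i =>
    let temp := acc.2 ++ [cs.getD i default]
    let temp := ((List.range ks.length).reverse).foldl
      (fun t j => t.set i (Char.ofNat ((ks.getD j default).toNat ^^^ (t.getD i default).toNat))) temp
    (acc.1 ++ [temp.getD i default], temp)) ([], [])
  String.mk st.1

-- ===== PORT B =====
-- literal transliteration of Source B: fold the key's codes into k, then map chr(ord(c) ^ k) over the string
def xor_uncipher_alt (string : String) (key : String) : String :=
  let k := key.toList.foldl (fun a ch => a ^^^ ch.toNat) 0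
  String.mk (string.toList.map (fun ch => Char.ofNat (ch.toNat ^^^ k)))

-- ===== PRECONDITION & SPEC =====
def Spec_xor_uncipher (string : String) (key : String) (out : String) : Prop := out = xor_uncipher_alt string key
instance (string : String) (key : String) (out : String) : Decidable (Spec_xor_uncipher string key out) := by unfold Spec_xor_uncipher; infer_instance

-- ===== CLAIM (what is proved, stated in full; the proofs are below) =====
def Claim_equal_xor_uncipher : Prop := ∀ (string : String) (key : String), Dom_xor_uncipher string key → Spec_xor_uncipher string key (xor_uncipher string key)

-- ===== LEMMAS AND PROOFS =====

lemma chr_toNat (a : Nat) (h : a < 55296) : (Char.ofNat a).toNat = a := by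
  have hv : a.isValidChar := Or.inl h
  rw [Char.ofNat, dif_pos hv]; rfl

lemma xor_lt_128 {m k : Nat} (h1 : m < 128) (h2 : k < 128) : m ^^^ k < 128 := by
  have : m ^^^ k < 2 ^ 7 := Nat.xor_lt_two_pow (by norm_num [h1] : m < 2 ^ 7) (by norm_num [h2])
  simpa using this

lemma xor_pull (l : List Char) (x a : Nat) :
    l.foldl (fun b ch => ch.toNat ^^^ b) (x ^^^ a) = x ^^^ l.foldl (fun b ch => ch.toNat ^^^ b) a := by
  induction l generalizing a with
  | nil => rfl
  | cons c l ih =>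
    simp only [List.foldl_cons]
    rw [show c.toNat ^^^ (x ^^^ a) = x ^^^ (c.toNat ^^^ a) by
      rw [← Nat.xor_assoc, Nat.xor_comm c.toNat x, Nat.xor_assoc], ih]

lemma xor_rev (l : List Char) (a : Nat) :
    l.reverse.foldl (fun b ch => ch.toNat ^^^ b) a = l.foldl (fun b ch => ch.toNat ^^^ b) a := by
  induction l generalizing a with
  | nil => rfl
  | cons c l ih =>
    simp only [List.reverse_cons, List.foldl_append, List.foldl_cons, List.foldl_nil, ih]
    rw [xor_pull, Nat.xor_comm]

lemma inner_fold (l : List Char) (hl : ∀ c ∈ l, c.toNat < 128)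
    (t : List Char) (i : Nat) (hi : i < t.length) (a : Nat) (ha : a < 128) :
    l.foldl (fun t' ch => t'.set i (Char.ofNat (ch.toNat ^^^ (t'.getD i default).toNat)))
        (t.set i (Char.ofNat a))
      = t.set i (Char.ofNat (l.foldl (fun b ch => ch.toNat ^^^ b) a)) := by
  induction l generalizing a with
  | nil => rfl
  | cons c l ih =>
    simp only [List.foldl_cons]
    have hget : (t.set i (Char.ofNat a)).getD i default = Char.ofNat a := by
      rw [List.getD_eq_getElem _ _ (by simpa using hi)]
      simp
    rw [hget, chr_toNat a (by omega), List.set_set]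
    exact ih (fun d hd => hl d (List.mem_cons_of_mem _ hd))
      _ (xor_lt_128 (hl c List.mem_cons_self) ha)

lemma map_getD_range (l : List Char) :
    (List.range l.length).map (fun i => l.getD i default) = l := by
  apply List.ext_getElem
  · simp
  · intro i h1 h2
    simp [List.getElem?_eq_getElem h2]

lemma foldl_rev_range {α : Type} (step : α → Char → α) (l : List Char) (t0 : α) :
    (List.range l.length).reverse.foldl (fun t j => step t (l.getD j default)) t0
      = l.reverse.foldl step t0 := by
  conv_rhs => rw [← map_getD_range l]
  rw [← List.map_reverse, List.foldl_map]

lemma foldl_xor_swap (l : List Char) (a : Nat) :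
    l.foldl (fun a ch => a ^^^ ch.toNat) a = l.foldl (fun b ch => ch.toNat ^^^ b) a := by
  induction l generalizing a with
  | nil => rfl
  | cons c l ih =>
    simp only [List.foldl_cons]
    rw [ih, Nat.xor_comm]

lemma key_fold_eq (ks : List Char) (c : Nat) :
    ks.foldl (fun b ch => ch.toNat ^^^ b) c = c ^^^ ks.foldl (fun a ch => a ^^^ ch.toNat) 0 := by
  rw [foldl_xor_swap]
  conv_lhs => rw [show c = c ^^^ 0 from (Nat.xor_zero c).symm]
  rw [xor_pull]

lemma outer_fold (cs ks : List Char) (hcs : ∀ c ∈ cs, c.toNat < 128)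
    (hks : ∀ c ∈ ks, c.toNat < 128) :
    ∀ m, m ≤ cs.length →
      (List.range m).foldl (fun (acc : List Char × List Char) i =>
          let temp := acc.2 ++ [cs.getD i default]
          let temp := ((List.range ks.length).reverse).foldl
            (fun t j => t.set i (Char.ofNat ((ks.getD j default).toNat ^^^ (t.getD i default).toNat))) temp
          (acc.1 ++ [temp.getD i default], temp)) ([], [])
        = ((cs.take m).map (fun c => Char.ofNat (ks.foldl (fun b ch => ch.toNat ^^^ b) c.toNat)),
           (cs.take m).map (fun c => Char.ofNat (ks.foldl (fun b ch => ch.toNat ^^^ b) c.toNat))) := by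
  intro m hm
  induction m with
  | zero => simp
  | succ m ih =>
    have hm' : m ≤ cs.length := Nat.le_of_succ_le hm
    have hmlt : m < cs.length := hm
    rw [List.range_succ, List.foldl_append, ih hm']
    simp only [List.foldl_cons, List.foldl_nil]
    set f : Char → Char := fun c => Char.ofNat (ks.foldl (fun b ch => ch.toNat ^^^ b) c.toNat) with hf
    set p := (cs.take m).map f with hp
    have hplen : p.length = m := by simp [hp, Nat.min_eq_left hm']
    have hc : cs.getD m default = cs[m] := List.getD_eq_getElem _ _ hmlt
    have hset : ∀ x : Char, (p ++ [cs[m]]).set m x = p ++ [x] := by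
      intro x
      have := List.set_append_right (s := p) (t := [cs[m]]) m x (by omega)
      simpa [hplen] using this
    have hstart : p ++ [cs[m]] = (p ++ [cs[m]]).set m (Char.ofNat (cs[m].toNat ^^^ 0)) := by
      rw [hset, Nat.xor_zero, Char.ofNat_toNat]
    have hlen : m < (p ++ [cs[m]]).length := by simp [hplen]
    have hrev : ∀ d ∈ ks.reverse, d.toNat < 128 := fun d hd => hks d (List.mem_reverse.mp hd)
    have hxa : cs[m].toNat ^^^ 0 < 128 := by
      rw [Nat.xor_zero]; exact hcs cs[m] (List.getElem_mem hmlt)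
    have hinner : List.foldl (fun t j => t.set m (Char.ofNat ((ks.getD j default).toNat ^^^ (t.getD m default).toNat)))
        (p ++ [cs[m]]) (List.range ks.length).reverse
      = ks.reverse.foldl (fun t ch => t.set m (Char.ofNat (ch.toNat ^^^ (t.getD m default).toNat))) (p ++ [cs[m]]) :=
      foldl_rev_range (fun t ch => t.set m (Char.ofNat (ch.toNat ^^^ (t.getD m default).toNat))) ks (p ++ [cs[m]])
    rw [hc, hinner, hstart, inner_fold ks.reverse hrev _ m hlen _ hxa, hset]
    have hval : Char.ofNat (ks.reverse.foldl (fun b ch => ch.toNat ^^^ b) (cs[m].toNat ^^^ 0)) = f cs[m] := by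
      rw [Nat.xor_zero, xor_rev, hf]
    rw [hval]
    have hgd : (p ++ [f cs[m]]).getD m default = f cs[m] := by
      rw [List.getD_eq_getElem _ _ (by simp [hplen])]
      simp [hplen]
    rw [hgd]
    have htake : cs.take (m + 1) = cs.take m ++ [cs[m]] := by
      rw [List.take_add_one, List.getElem?_eq_getElem hmlt]; rfl
    rw [htake, List.map_append, ← hp]
    rfl

lemma dom_lt_128 (s : String) (h : pvDomStr s = true) : ∀ c ∈ s.toList, c.toNat < 128 := by
  intro c hc
  have := (List.all_eq_true.mp h) c hc
  simp only [pvDomChar, Bool.or_eq_true, Bool.and_eq_true, decide_eq_true_eq, beq_iff_eq] at this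
  omega

-- ===== VERDICT (by name: the statement is the Claim_ definition above) =====
theorem xor_uncipher_spec : Claim_equal_xor_uncipher := by
  intro string key hdom
  unfold Spec_xor_uncipher
  have hdom' := hdom
  unfold Dom_xor_uncipher at hdom'
  rw [Bool.and_eq_true] at hdom'
  have hcs := dom_lt_128 string hdom'.1
  have hks := dom_lt_128 key hdom'.2
  simp only [xor_uncipher, xor_uncipher_alt]
  rw [outer_fold string.toList key.toList hcs hks string.toList.length (le_refl _)]
  simp only [List.take_length]
  congr 1
  apply List.map_congr_left
  intro c _
  rw [key_fold_eq]
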